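-- pv_equiv track=rewrite | github.com/DoreenP8387631eggy/csv-surgeon | csv_surgeon/censor.py | censor_columns
-- ===== SOURCE A (Python) =====
-- from typing import Iterable, Iterator
--
-- def censor_columns(
--     rows: Iterable[dict], cols: list[str], replacement: str = "***"
-- ) -> Iterator[dict]:
--     """Replace values in all listed columns with *replacement*."""
--     for row in rows:
--         out = dict(row)
--         for col in cols:
--             if col in out:
--                 out[col] = replacement
--         yield out
-- ===== SOURCE B (Python) =====
-- def censor_columns(rows, cols, replacement="***"):
--     """Replace values in all listed columns with *replacement*."""
--     colset = set(cols)
--     for row in rows: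
--         yield {k: (replacement if k in colset else v) for k, v in row.items()}
-- ===== Notes on version B (the rewrite author's own statement) =====
-- stated objective: idiomatic
-- what changed: B builds a membership set of cols once and yields a dict comprehension over each row's items, instead of copying the dict and mutating it while scanning cols per row.
import Mathlib
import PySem

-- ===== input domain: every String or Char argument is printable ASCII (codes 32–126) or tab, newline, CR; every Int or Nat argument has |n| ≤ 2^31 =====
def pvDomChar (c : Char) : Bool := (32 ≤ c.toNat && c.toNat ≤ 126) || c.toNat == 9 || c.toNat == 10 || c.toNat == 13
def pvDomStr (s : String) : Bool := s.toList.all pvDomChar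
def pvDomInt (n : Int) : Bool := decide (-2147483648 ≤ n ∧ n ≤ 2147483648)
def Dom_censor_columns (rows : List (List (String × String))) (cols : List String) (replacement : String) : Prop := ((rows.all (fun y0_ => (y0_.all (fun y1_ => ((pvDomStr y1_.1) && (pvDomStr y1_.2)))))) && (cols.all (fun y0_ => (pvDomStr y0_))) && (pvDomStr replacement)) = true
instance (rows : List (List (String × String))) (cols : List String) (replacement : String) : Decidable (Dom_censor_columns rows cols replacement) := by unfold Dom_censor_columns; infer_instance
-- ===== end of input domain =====

-- ===== PORT A =====
-- A: copy each row into a dict, then for each listed col present, overwrite it.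
def censor_columns (rows : List (List (String × String))) (cols : List String) (replacement : String) : List (List (String × String)) :=
  rows.map (fun row =>
    (cols.foldl
      (fun out col => if out.contains col then out.insert col replacement else out)
      (PySem.Dict.ofList row)).items)

-- ===== PORT B =====
-- B: build the membership set once; per row, a comprehension over the row's items.
def censor_columns_alt (rows : List (List (String × String))) (cols : List String) (replacement : String) : List (List (String × String)) :=
  let colset := PySem.Set.ofList cols
  rows.map (fun row =>
    (PySem.Dict.ofList row).items.map
      (fun p => (p.1, if p.1 ∈ colset then replacement else p.2)))

-- ===== PRECONDITION & SPEC =====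
def Spec_censor_columns (rows : List (List (String × String))) (cols : List String) (replacement : String) (out : List (List (String × String))) : Prop := out = censor_columns_alt rows cols replacement
instance (rows : List (List (String × String))) (cols : List String) (replacement : String) (out : List (List (String × String))) : Decidable (Spec_censor_columns rows cols replacement out) := by unfold Spec_censor_columns; infer_instance

-- ===== CLAIM (what is proved, stated in full; the proofs are below) =====
def Claim_equal_censor_columns : Prop := ∀ (rows : List (List (String × String))) (cols : List String) (replacement : String), Dom_censor_columns rows cols replacement → Spec_censor_columns rows cols replacement (censor_columns rows cols replacement)

-- ===== LEMMAS AND PROOFS =====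

-- ===== VERDICT (by name: the statement is the Claim_ definition above) =====
-- The cols-loop on a dict rewrites exactly the entries whose key is in cols.
theorem censor_loop_items (replacement : String) (cols : List String)
    (d : PySem.Dict String String) :
    (cols.foldl
      (fun out col => if out.contains col then out.insert col replacement else out)
      d).items
    = d.items.map (fun p => (p.1, if p.1 ∈ cols then replacement else p.2)) := by
  induction cols generalizing d with
  | nil => simp
  | cons c cs ih =>
    simp only [List.foldl_cons]
    rw [ih]
    by_cases hc : d.contains c = true
    · rw [if_pos hc, PySem.Dict.items_insert_of_contains (h := hc), List.map_map]
      apply List.map_congr_left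
      intro p _
      by_cases hpc : p.1 = c
      · simp [Function.comp, hpc]
      · simp [Function.comp, beq_iff_eq, hpc, List.mem_cons]
    · rw [if_neg hc]
      apply List.map_congr_left
      intro p hp
      have hpk : p.1 ∈ d.keys := PySem.Dict.mem_keys_of_mem_items d hp
      have hpc : p.1 ≠ c := by
        intro h
        exact hc ((PySem.Dict.contains_iff_mem_keys d c).2 (h ▸ hpk))
      simp [List.mem_cons, hpc]

theorem censor_columns_spec : Claim_equal_censor_columns := by
  intro rows cols replacement _
  unfold Spec_censor_columns censor_columns censor_columns_alt
  simp only []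
  apply List.map_congr_left
  intro row _
  rw [censor_loop_items]
  apply List.map_congr_left
  intro p _
  simp [PySem.Set.mem_ofList]
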